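-- pv_equiv track=rewrite | github.com/Keiii25/radix_sort_algorithm | radix_sort.py | counting_sort_len
-- ===== SOURCE A (Python) =====
-- def counting_sort_len(new_list):
--     '''
--     Sorts strings in a list according to the length of the strings in a non decreasing order
--     :param: new_list: A list of tuples consisting strings
--     :time complexity: O(n+m), where n = length of new_list, m = length of the longest string in the list
--     :space complexity: O(m), m = length of the longest string in the list
--     '''
--     if len(new_list) == 0:
--         return new_list
--     #find the maximum
--     max_item = len(new_list[0][0])
--     for item in new_list:
--         item = len(item[0])
--         if item > max_item:
--             max_item = item
--
--     #initialise count array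
--     count_array = [None]*(max_item+1)
--     for i in range(len(count_array)):
--         count_array[i] = []
--
--     #update input array
--     index = 0
--     for item in new_list:
--         count_array[len(item[0])].append(item)
--
--     index = 0
--     for i in range(len(count_array)):
--         for j in range(len(count_array[i])):
--             new_list[index] = count_array[i][j]
--             index += 1
--
--     #new list is sorted
--     return new_list
-- ===== SOURCE B (Python) =====
-- def counting_sort_len(new_list):
--     # One stable library sort keyed on first-string length replaces A's counting sort;
--     # slice assignment mutates the same list object, like A's in-place writes.
--     new_list[:] = sorted(new_list, key=lambda t: len(t[0]))
--     return new_list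
-- ===== Notes on version B (the rewrite author's own statement) =====
-- stated objective: simpler
-- what changed: Replaced the hand-written counting sort (max-length scan, bucket array, redistribution loop) with a single stable Timsort call keyed on len(t[0]) written back via slice assignment.
import Mathlib
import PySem

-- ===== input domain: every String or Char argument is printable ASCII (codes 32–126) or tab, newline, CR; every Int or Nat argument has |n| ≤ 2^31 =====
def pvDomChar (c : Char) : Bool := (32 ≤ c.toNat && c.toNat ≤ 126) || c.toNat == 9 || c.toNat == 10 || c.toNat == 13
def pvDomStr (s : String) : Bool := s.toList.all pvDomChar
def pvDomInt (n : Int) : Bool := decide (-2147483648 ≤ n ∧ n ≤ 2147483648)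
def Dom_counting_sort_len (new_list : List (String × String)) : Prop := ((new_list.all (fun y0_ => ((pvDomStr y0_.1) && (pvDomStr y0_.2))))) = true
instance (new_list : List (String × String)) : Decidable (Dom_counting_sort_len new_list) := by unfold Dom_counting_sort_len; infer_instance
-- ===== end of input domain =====

-- B replaces A's hand-written counting sort with one stable library sort keyed on len(t[0]);
-- equivalence is about the return value (both Pythons also mutate new_list in place the same way).


-- ===== PORT A =====
def counting_sort_len (new_list : List (String × String)) : List (String × String) :=
  if PySem.List.len new_list == 0 then new_list
  else
    -- find the maximum
    let max_item : Nat := new_list.foldl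
      (fun m item => if item.1.toList.length > m then item.1.toList.length else m)
      (PySem.List.pyGetD new_list 0 ("", "")).1.toList.length
    -- initialise count array
    let count_array : List (List (String × String)) :=
      (List.range (max_item + 1)).map (fun _ => [])
    -- update input array: count_array[len(item[0])].append(item)
    let count_array := new_list.foldl
      (fun ca item => ca.modify item.1.toList.length (fun b => b ++ [item])) count_array
    -- redistribute: new_list[index] = count_array[i][j]; index += 1
    (count_array.foldl
      (fun (st : List (String × String) × Int) bucket =>
        bucket.foldl (fun st2 v => (PySem.List.pySetD st2.1 st2.2 v, st2.2 + 1)) st)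
      (new_list, 0)).1

-- ===== PORT B =====
def counting_sort_len_alt (new_list : List (String × String)) : List (String × String) :=
  PySem.List.sorted new_list (fun t => PySem.Str.len t.1) false

-- ===== PRECONDITION & SPEC =====
def Spec_counting_sort_len (new_list : List (String × String)) (out : List (String × String)) : Prop := out = counting_sort_len_alt new_list
instance (new_list : List (String × String)) (out : List (String × String)) : Decidable (Spec_counting_sort_len new_list out) := by unfold Spec_counting_sort_len; infer_instance

-- ===== CLAIM (what is proved, stated in full; the proofs are below) =====
def Claim_equal_counting_sort_len : Prop := ∀ (new_list : List (String × String)), Dom_counting_sort_len new_list → Spec_counting_sort_len new_list (counting_sort_len new_list)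

-- ===== LEMMAS AND PROOFS =====

-- the bucket index of a tuple: len(item[0])
def pvK (t : String × String) : Nat := t.1.toList.length

-- the buckets: for each i < n, the elements of xs whose first string has length i, in order
def pvBkt (xs : List (String × String)) (n : Nat) : List (List (String × String)) :=
  (List.range n).map (fun i => xs.filter (fun x => pvK x == i))

lemma pvBkt_nil (n : Nat) : pvBkt [] n = (List.range n).map (fun _ => []) := by
  simp [pvBkt]

-- appending one element to its bucket extends the bucketed list by that element
lemma pvBkt_modify (pre : List (String × String)) (x : String × String) (n : Nat) :
    (pvBkt pre n).modify (pvK x) (fun b => b ++ [x]) = pvBkt (pre ++ [x]) n := by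
  apply List.ext_getElem
  · simp [pvBkt]
  · intro i h1 h2
    simp only [pvBkt, List.getElem_modify, List.getElem_map, List.getElem_range] at *
    rw [List.filter_append]
    by_cases hi : pvK x = i
    · simp [hi]
    · simp [hi]

-- the fill loop turns empty buckets of the prefix into buckets of prefix ++ rest
lemma pvFill (ys : List (String × String)) (pre : List (String × String)) (n : Nat)
    (hy : ∀ x ∈ ys, pvK x < n) :
    ys.foldl (fun ca item => ca.modify item.1.toList.length (fun b => b ++ [item])) (pvBkt pre n)
      = pvBkt (pre ++ ys) n := by
  induction ys generalizing pre with
  | nil => simp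
  | cons x ys ih =>
    simp only [List.foldl_cons]
    have hx : pvK x < n := hy x (by simp)
    have : (pvBkt pre n).modify x.1.toList.length (fun b => b ++ [x]) = pvBkt (pre ++ [x]) n :=
      pvBkt_modify pre x n
    rw [this, ih (pre ++ [x]) (fun z hz => hy z (by simp [hz]))]
    simp

-- insertBy skips a block of elements it must not go before
lemma pvInsertBy_append (bf : (String × String) → (String × String) → Bool) (x : String × String)
    (ys zs : List (String × String)) (h : ∀ y ∈ ys, bf x y = false) :
    PySem.List.insertBy bf x (ys ++ zs) = ys ++ PySem.List.insertBy bf x zs := by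
  induction ys with
  | nil => simp
  | cons y ys ih =>
    have hy : bf x y = false := h y (by simp)
    simp [PySem.List.insertBy, hy, ih (fun z hz => h z (by simp [hz]))]

-- insertBy goes in front of a block it must go before
lemma pvInsertBy_front (bf : (String × String) → (String × String) → Bool) (x : String × String)
    (zs : List (String × String)) (h : ∀ z ∈ zs, bf x z = true) :
    PySem.List.insertBy bf x zs = x :: zs := by
  cases zs with
  | nil => simp [PySem.List.insertBy]
  | cons z zs => simp [PySem.List.insertBy, h z (by simp)]

-- inserting into a flattened bucket list = appending to the right bucket
lemma pvInsert_flatten (bf : (String × String) → (String × String) → Bool) (x : String × String)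
    (cs : List (List (String × String))) (j : Nat) (hj : j < cs.length)
    (h : ∀ i, (hi : i < cs.length) → ∀ y ∈ cs[i],
        (i ≤ j → bf x y = false) ∧ (j < i → bf x y = true)) :
    PySem.List.insertBy bf x cs.flatten = (cs.modify j (fun b => b ++ [x])).flatten := by
  induction cs generalizing j with
  | nil => simp at hj
  | cons c cs ih =>
    cases j with
    | zero =>
      have hc : ∀ y ∈ c, bf x y = false := by
        intro y hy; exact ((h 0 (by simp) y hy).1 (by omega))
      have hrest : ∀ z ∈ cs.flatten, bf x z = true := by
        intro z hz
        obtain ⟨b, hb, hzb⟩ := List.mem_flatten.mp hz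
        obtain ⟨i, hi, rfl⟩ := List.mem_iff_getElem.mp hb
        exact ((h (i+1) (by simpa using Nat.succ_lt_succ hi) z hzb).2 (by omega))
      simp only [List.flatten_cons, List.modify_zero_cons]
      rw [pvInsertBy_append bf x c cs.flatten hc, pvInsertBy_front bf x cs.flatten hrest]
      simp
    | succ j =>
      have hc : ∀ y ∈ c, bf x y = false := by
        intro y hy; exact ((h 0 (by simp) y hy).1 (by omega))
      simp only [List.flatten_cons, List.modify_succ_cons]
      rw [pvInsertBy_append bf x c cs.flatten hc]
      rw [ih j (by simpa using Nat.succ_lt_succ_iff.mp hj)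
        (fun i hi y hy => by
          have := h (i+1) (by simpa using Nat.succ_lt_succ hi) y hy
          exact ⟨fun hle => this.1 (by omega), fun hlt => this.2 (by omega)⟩)]

-- the comparison used by sorted(…, key=len∘fst) in terms of pvK
lemma pvBf_eq (x y : String × String) :
    (decide (PySem.Str.len x.1 < PySem.Str.len y.1)) = decide (pvK x < pvK y) := by
  simp [PySem.Str.len_eq, pvK]

-- the stable sort is the flattened bucket list
lemma pvSorted_flatten (xs : List (String × String)) (n : Nat)
    (hx : ∀ x ∈ xs, pvK x < n) :
    PySem.List.sorted xs (fun t => PySem.Str.len t.1) false = (pvBkt xs n).flatten := by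
  rw [PySem.List.sorted_eq_foldl_insertBy]
  have key : ∀ (ys pre : List (String × String)), (∀ x ∈ ys, pvK x < n) →
      ys.foldl (fun acc x =>
          PySem.List.insertBy (fun a b => decide (PySem.Str.len a.1 < PySem.Str.len b.1)) x acc)
        (pvBkt pre n).flatten = (pvBkt (pre ++ ys) n).flatten := by
    intro ys
    induction ys with
    | nil => intro pre _; simp
    | cons x ys ih =>
      intro pre hmem
      have hx' : pvK x < n := hmem x (by simp)
      simp only [List.foldl_cons]
      have hstep : PySem.List.insertBy
          (fun a b => decide (PySem.Str.len a.1 < PySem.Str.len b.1)) x (pvBkt pre n).flatten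
          = ((pvBkt pre n).modify (pvK x) (fun b => b ++ [x])).flatten := by
        apply pvInsert_flatten _ x (pvBkt pre n) (pvK x) (by simpa [pvBkt] using hx')
        intro i hi y hy
        have hki : pvK y = i := by
          simp only [pvBkt, List.getElem_map, List.getElem_range] at hy
          exact beq_iff_eq.mp (List.mem_filter.mp hy).2
        constructor
        · intro hle
          simp only [pvBf_eq, decide_eq_false_iff_not, not_lt]
          omega
        · intro hlt
          simp only [pvBf_eq, decide_eq_true_eq]
          omega
      rw [hstep, pvBkt_modify pre x n, ih (pre ++ [x]) (fun z hz => hmem z (by simp [hz]))]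
      simp
  have h0 : (pvBkt [] n).flatten = [] := by simp [pvBkt]
  have := key xs [] hx
  rw [h0] at this
  simpa using this

-- writing v at position pre.length of pre ++ a :: rest
lemma pvSet_mid (pre rest : List (String × String)) (a v : String × String) :
    PySem.List.pySetD (pre ++ a :: rest) (pre.length : Int) v = pre ++ v :: rest := by
  simp only [PySem.List.pySetD, PySem.List.pySet?, PySem.List.pyIdx?]
  have h1 : (0:Int) ≤ (pre.length : Int) := by positivity
  have h2 : (pre.length : Int) < ((pre ++ a :: rest).length : Int) := by
    simp
  simp only [h1, if_pos, if_pos h2, Int.toNat_natCast, Option.map_some, Option.getD_some]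
  induction pre with
  | nil => simp
  | cons p pre ih => simp_all

-- the inner write loop lays a bucket down over the suffix
lemma pvWrite_bucket (b : List (String × String)) (pre rest : List (String × String))
    (hlen : b.length ≤ rest.length) :
    b.foldl (fun st2 v => (PySem.List.pySetD st2.1 st2.2 v, st2.2 + 1)) (pre ++ rest, (pre.length : Int))
      = (pre ++ b ++ rest.drop b.length, ((pre ++ b).length : Int)) := by
  induction b generalizing pre rest with
  | nil => simp
  | cons v b ih =>
    cases rest with
    | nil => simp at hlen
    | cons a rest =>
      simp only [List.foldl_cons]
      rw [pvSet_mid pre rest a v]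
      have : pre ++ v :: rest = (pre ++ [v]) ++ rest := by simp
      rw [this]
      have hcast : (pre.length : Int) + 1 = ((pre ++ [v]).length : Int) := by simp
      rw [hcast, ih (pre ++ [v]) rest (by simpa using hlen)]
      simp

-- the outer redistribution loop writes the flattened buckets over new_list
lemma pvWrite_all (cs : List (List (String × String))) (pre rest : List (String × String))
    (hlen : rest.length = cs.flatten.length) :
    (cs.foldl (fun (st : List (String × String) × Int) bucket =>
        bucket.foldl (fun st2 v => (PySem.List.pySetD st2.1 st2.2 v, st2.2 + 1)) st)
      (pre ++ rest, (pre.length : Int))).1 = pre ++ cs.flatten := by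
  induction cs generalizing pre rest with
  | nil => simp_all
  | cons c cs ih =>
    simp only [List.foldl_cons]
    have hlec : c.length ≤ rest.length := by simp [hlen]
    rw [pvWrite_bucket c pre rest hlec]
    have : pre ++ c ++ rest.drop c.length = (pre ++ c) ++ rest.drop c.length := by simp
    rw [ih (pre ++ c) (rest.drop c.length) (by simp [hlen])]
    simp

-- the whole of A's non-empty branch computes the stable sort
lemma pvMain (xs : List (String × String)) (n : Nat) (h : ∀ x ∈ xs, pvK x < n) :
    ((xs.foldl (fun ca item => ca.modify item.1.toList.length (fun b => b ++ [item]))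
        ((List.range n).map (fun _ => []))).foldl
       (fun (st : List (String × String) × Int) bucket =>
          bucket.foldl (fun st2 v => (PySem.List.pySetD st2.1 st2.2 v, st2.2 + 1)) st)
       (xs, 0)).1 = PySem.List.sorted xs (fun t => PySem.Str.len t.1) false := by
  have hfill : xs.foldl (fun ca item => ca.modify item.1.toList.length (fun b => b ++ [item]))
      ((List.range n).map (fun _ => [])) = pvBkt xs n := by
    rw [← pvBkt_nil]
    simpa using pvFill xs [] n h
  have hsorted := pvSorted_flatten xs n h
  have hlen : xs.length = (pvBkt xs n).flatten.length := by
    have hp := PySem.List.sorted_perm xs (fun t => PySem.Str.len t.1) false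
    rw [hsorted] at hp
    exact hp.length_eq.symm
  rw [hfill, hsorted]
  have := pvWrite_all (pvBkt xs n) [] xs hlen
  simpa using this

-- ===== VERDICT (by name: the statement is the Claim_ definition above) =====
theorem counting_sort_len_spec : Claim_equal_counting_sort_len := by
  intro xs _
  unfold Spec_counting_sort_len counting_sort_len counting_sort_len_alt
  cases xs with
  | nil => simp [PySem.List.len, PySem.List.sorted]
  | cons x0 t =>
    have hne : (PySem.List.len (x0 :: t) == 0) = false := by
      rw [PySem.List.len_eq]
      simp only [List.length_cons, beq_eq_false_iff_ne, ne_eq]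
      omega
    simp only [hne, Bool.false_eq_true, if_false]
    -- the bound: every length is at most the computed maximum
    have hbound : ∀ x ∈ x0 :: t,
        pvK x ≤ (x0 :: t).foldl
          (fun m item => if item.1.toList.length > m then item.1.toList.length else m)
          (PySem.List.pyGetD (x0 :: t) 0 ("", "")).1.toList.length := by
      intro x hx
      have hfun : (fun (m : Nat) (item : String × String) =>
          if item.1.toList.length > m then item.1.toList.length else m)
          = (fun m item => max m (pvK item)) := by
        funext m item
        simp only [pvK]
        split_ifs with h <;> omega
      rw [hfun, PySem.List.pyGetD_zero_cons]
      exact (PySem.List.le_foldl_max_nat (x0 :: t) pvK x0.1.toList.length).2 x hx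
    exact pvMain (x0 :: t) _ (fun x hx => Nat.lt_succ_of_le (hbound x hx))
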